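-- pv_equiv track=rewrite | github.com/kundalee99/kundali99 | app.py | calculate_ascendant
-- ===== SOURCE A (Python) =====
-- def calculate_ascendant(hour):
--     """Calculate ascendant based on birth time"""
--     ascendant_map = {
--         0: ('Aries', 'Mesha'), 2: ('Taurus', 'Vrishabha'), 4: ('Gemini', 'Mithuna'),
--         6: ('Cancer', 'Karka'), 8: ('Leo', 'Simha'), 10: ('Virgo', 'Kanya'),
--         12: ('Libra', 'Tula'), 14: ('Scorpio', 'Vrishchika'), 16: ('Sagittarius', 'Dhanu'),
--         18: ('Capricorn', 'Makara'), 20: ('Aquarius', 'Kumbha'), 22: ('Pisces', 'Meena')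
--     }
--
--     for time_key in sorted(ascendant_map.keys(), reverse=True):
--         if hour >= time_key:
--             return ascendant_map[time_key]
--     return ('Aries', 'Mesha')
-- ===== SOURCE B (Python) =====
-- SIGNS = [
--     ('Aries', 'Mesha'), ('Taurus', 'Vrishabha'), ('Gemini', 'Mithuna'),
--     ('Cancer', 'Karka'), ('Leo', 'Simha'), ('Virgo', 'Kanya'),
--     ('Libra', 'Tula'), ('Scorpio', 'Vrishchika'), ('Sagittarius', 'Dhanu'),
--     ('Capricorn', 'Makara'), ('Aquarius', 'Kumbha'), ('Pisces', 'Meena')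
-- ]
--
-- def calculate_ascendant(hour):
--     """Calculate ascendant based on birth time"""
--     idx = min(max(hour // 2, 0), 11)
--     return SIGNS[idx]
-- ===== Notes on version B (the rewrite author's own statement) =====
-- stated objective: simpler
-- what changed: Replaces the dict plus descending linear scan over sorted keys with a closed-form clamped index hour//2 into a fixed-order 12-entry table.
import Mathlib
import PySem

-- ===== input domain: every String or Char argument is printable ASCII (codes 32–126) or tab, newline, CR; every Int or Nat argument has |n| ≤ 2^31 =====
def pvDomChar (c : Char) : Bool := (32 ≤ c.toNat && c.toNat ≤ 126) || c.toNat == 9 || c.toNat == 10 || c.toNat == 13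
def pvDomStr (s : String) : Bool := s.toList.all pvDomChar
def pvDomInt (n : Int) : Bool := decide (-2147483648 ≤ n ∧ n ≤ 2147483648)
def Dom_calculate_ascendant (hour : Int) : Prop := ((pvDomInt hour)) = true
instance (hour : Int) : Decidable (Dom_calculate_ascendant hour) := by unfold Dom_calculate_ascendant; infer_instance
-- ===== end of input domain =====

-- B replaces A's descending scan over sorted dict keys by a clamped closed-form table index (simpler; return value only).

-- ===== PORT A =====
-- the dict literal of A, in insertion order
def ascendantMap : PySem.Dict Int (String × String) :=
  PySem.Dict.ofList
  [(0, ("Aries", "Mesha")), (2, ("Taurus", "Vrishabha")), (4, ("Gemini", "Mithuna")),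
   (6, ("Cancer", "Karka")), (8, ("Leo", "Simha")), (10, ("Virgo", "Kanya")),
   (12, ("Libra", "Tula")), (14, ("Scorpio", "Vrishchika")), (16, ("Sagittarius", "Dhanu")),
   (18, ("Capricorn", "Makara")), (20, ("Aquarius", "Kumbha")), (22, ("Pisces", "Meena"))]

-- the for-loop with early return; dict access ascendant_map[time_key] via get?
-- (the key scanned is always a key of the dict, so the .getD fallback is never taken)
def ascendantLoop (hour : Int) : List Int → String × String
  | [] => ("Aries", "Mesha")
  | k :: ks =>
    if hour ≥ k then (PySem.Dict.get? ascendantMap k).getD ("Aries", "Mesha")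
    else ascendantLoop hour ks

def calculate_ascendant (hour : Int) : String × String :=
  ascendantLoop hour (PySem.List.sorted (PySem.Dict.keys ascendantMap) (fun k => k) (reverse := true))

-- ===== PORT B =====
def signsTable : List (String × String) :=
  [("Aries", "Mesha"), ("Taurus", "Vrishabha"), ("Gemini", "Mithuna"),
   ("Cancer", "Karka"), ("Leo", "Simha"), ("Virgo", "Kanya"),
   ("Libra", "Tula"), ("Scorpio", "Vrishchika"), ("Sagittarius", "Dhanu"),
   ("Capricorn", "Makara"), ("Aquarius", "Kumbha"), ("Pisces", "Meena")]

-- idx is clamped to [0,11], so the pyGet? is always some; .getD fallback never taken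
def calculate_ascendant_alt (hour : Int) : String × String :=
  let idx := min (max (PySem.Int.floordiv hour 2) 0) 11
  (PySem.List.pyGet? signsTable idx).getD ("Aries", "Mesha")

-- ===== PRECONDITION & SPEC =====
def Spec_calculate_ascendant (hour : Int) (out : String × String) : Prop := out = calculate_ascendant_alt hour
instance (hour : Int) (out : String × String) : Decidable (Spec_calculate_ascendant hour out) := by unfold Spec_calculate_ascendant; infer_instance

-- ===== CLAIM (what is proved, stated in full; the proofs are below) =====
def Claim_equal_calculate_ascendant : Prop := ∀ (hour : Int), Dom_calculate_ascendant hour → Spec_calculate_ascendant hour (calculate_ascendant hour)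

-- ===== LEMMAS AND PROOFS =====
theorem alt_at (hour : Int) (k : Int) (hk : min (max (hour / 2) 0) 11 = k) :
    calculate_ascendant_alt hour =
      (PySem.List.pyGet? signsTable k).getD ("Aries", "Mesha") := by
  unfold calculate_ascendant_alt
  rw [PySem.Int.floordiv_eq_ediv_of_pos (by omega), hk]

theorem loop_ge (hour k : Int) (ks : List Int) (h : hour ≥ k) :
    ascendantLoop hour (k :: ks) = (PySem.Dict.get? ascendantMap k).getD ("Aries", "Mesha") := by
  simp only [ascendantLoop]; rw [if_pos h]

theorem loop_lt (hour k : Int) (ks : List Int) (h : ¬ hour ≥ k) :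
    ascendantLoop hour (k :: ks) = ascendantLoop hour ks := by
  simp only [ascendantLoop]; rw [if_neg h]


-- ===== VERDICT (by name: the statement is the Claim_ definition above) =====
set_option maxHeartbeats 1000000 in
theorem calculate_ascendant_spec : Claim_equal_calculate_ascendant := by
  intro hour _
  unfold Spec_calculate_ascendant
  have hs : PySem.List.sorted (PySem.Dict.keys ascendantMap) (fun k => k) (reverse := true)
      = ([22, 20, 18, 16, 14, 12, 10, 8, 6, 4, 2, 0] : List Int) := by
    refine PySem.List.sorted_rev_eq_of_perm_of_pairwise_gt _ _ _ ?_ ?_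
    · have : ([22, 20, 18, 16, 14, 12, 10, 8, 6, 4, 2, 0] : List Int)
          = (PySem.Dict.keys ascendantMap).reverse := rfl
      rw [this]; exact List.reverse_perm _
    · norm_num [List.pairwise_cons]
  unfold calculate_ascendant
  rw [hs]
  by_cases h1 : hour ≥ 22
  · rw [loop_ge _ _ _ h1, alt_at hour 11 (by omega)]; rfl
  · rw [loop_lt _ _ _ h1]
    by_cases h2 : hour ≥ 20
    · rw [loop_ge _ _ _ h2, alt_at hour 10 (by omega)]; rfl
    · rw [loop_lt _ _ _ h2]
      by_cases h3 : hour ≥ 18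
      · rw [loop_ge _ _ _ h3, alt_at hour 9 (by omega)]; rfl
      · rw [loop_lt _ _ _ h3]
        by_cases h4 : hour ≥ 16
        · rw [loop_ge _ _ _ h4, alt_at hour 8 (by omega)]; rfl
        · rw [loop_lt _ _ _ h4]
          by_cases h5 : hour ≥ 14
          · rw [loop_ge _ _ _ h5, alt_at hour 7 (by omega)]; rfl
          · rw [loop_lt _ _ _ h5]
            by_cases h6 : hour ≥ 12
            · rw [loop_ge _ _ _ h6, alt_at hour 6 (by omega)]; rfl
            · rw [loop_lt _ _ _ h6]
              by_cases h7 : hour ≥ 10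
              · rw [loop_ge _ _ _ h7, alt_at hour 5 (by omega)]; rfl
              · rw [loop_lt _ _ _ h7]
                by_cases h8 : hour ≥ 8
                · rw [loop_ge _ _ _ h8, alt_at hour 4 (by omega)]; rfl
                · rw [loop_lt _ _ _ h8]
                  by_cases h9 : hour ≥ 6
                  · rw [loop_ge _ _ _ h9, alt_at hour 3 (by omega)]; rfl
                  · rw [loop_lt _ _ _ h9]
                    by_cases h10 : hour ≥ 4
                    · rw [loop_ge _ _ _ h10, alt_at hour 2 (by omega)]; rfl
                    · rw [loop_lt _ _ _ h10]
                      by_cases h11 : hour ≥ 2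
                      · rw [loop_ge _ _ _ h11, alt_at hour 1 (by omega)]; rfl
                      · rw [loop_lt _ _ _ h11]
                        by_cases h12 : hour ≥ 0
                        · rw [loop_ge _ _ _ h12, alt_at hour 0 (by omega)]; rfl
                        · rw [loop_lt _ _ _ h12, alt_at hour 0 (by omega)]; rfl
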